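-- pv_equiv track=rewrite | github.com/oresama5656/auto_X | tools/mix_files.py | create_balanced_mix
-- ===== SOURCE A (Python) =====
-- def create_balanced_mix(categories):
--     """バランス良いミックス順序を作成"""
--     mixed_order = []
--
--     # 各カテゴリの最大数を取得
--     max_expert = len(categories['expert'])
--     max_experience = len(categories['experience'])
--     max_other = len(categories['other'])
--     max_length = max(max_expert, max_experience, max_other)
--
--     # 3種ローテーションでバランス良く配置
--     for i in range(max_length):
--         # 専門記事 → 体験談 → その他 の順序で配置
--         if i < max_expert:
--             mixed_order.append(categories['expert'][i])
--         if i < max_experience: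
--             mixed_order.append(categories['experience'][i])
--         if i < max_other:
--             mixed_order.append(categories['other'][i])
--
--     return mixed_order
-- ===== SOURCE B (Python) =====
-- def create_balanced_mix(categories):
--     """バランス良いミックス順序を作成"""
--     # schedule-and-sort: give every item an explicit output position 3*i + rank,
--     # then order the whole pool by that key
--     tagged = [(3 * i + rank, v)
--               for rank, key in enumerate(('expert', 'experience', 'other'))
--               for i, v in enumerate(categories[key])]
--     return [v for _, v in sorted(tagged, key=lambda p: p[0])]
-- ===== Notes on version B (the rewrite author's own statement) =====
-- stated objective: alternative
-- what changed: Replaces the round-robin index loop by a schedule-and-sort algorithm: each item gets a computed integer output position 3*i+rank, the tagged pool is sorted by that key, and the values are read off; there is no interleaving loop at all.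
import Mathlib
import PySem

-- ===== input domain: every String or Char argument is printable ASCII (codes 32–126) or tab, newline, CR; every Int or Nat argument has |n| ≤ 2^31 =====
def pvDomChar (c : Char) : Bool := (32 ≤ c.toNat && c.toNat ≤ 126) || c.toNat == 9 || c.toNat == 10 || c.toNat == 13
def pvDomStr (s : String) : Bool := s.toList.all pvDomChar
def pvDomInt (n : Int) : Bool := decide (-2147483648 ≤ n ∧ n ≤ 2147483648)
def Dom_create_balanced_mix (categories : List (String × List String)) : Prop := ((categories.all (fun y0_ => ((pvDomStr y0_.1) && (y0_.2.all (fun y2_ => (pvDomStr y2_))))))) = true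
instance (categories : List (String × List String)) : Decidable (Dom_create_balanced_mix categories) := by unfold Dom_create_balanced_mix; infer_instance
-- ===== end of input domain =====

-- B replaces A's round-robin index loop with a schedule-and-sort algorithm: every item is
-- tagged with a computed output position 3*i+rank, the pool is sorted by that key, and the
-- values are read off (objective: alternative; no interleaving loop remains).

-- shared dict access categories[k] (first match; Pre_ guarantees the key is present)
def lookupCat (cats : List (String × List String)) (k : String) : List String :=
  ((cats.find? (fun p => p.1 == k)).map Prod.snd).getD []

-- ===== PORT A =====
def create_balanced_mix (categories : List (String × List String)) : List String :=
  let expert := lookupCat categories "expert"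
  let experience := lookupCat categories "experience"
  let other := lookupCat categories "other"
  let maxExpert : Int := expert.length
  let maxExperience : Int := experience.length
  let maxOther : Int := other.length
  let maxLength : Int := max maxExpert (max maxExperience maxOther)
  (PySem.List.pyRange 0 maxLength 1).foldl (fun acc i =>
    let acc := if i < maxExpert then acc ++ [PySem.List.pyGetD expert i ""] else acc
    let acc := if i < maxExperience then acc ++ [PySem.List.pyGetD experience i ""] else acc
    if i < maxOther then acc ++ [PySem.List.pyGetD other i ""] else acc) []

-- ===== PORT B =====
-- Source B: tagged = [(3*i + rank, v) for rank, key in enumerate(triple) for i, v in enumerate(categories[key])]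
--       return [v for _, v in sorted(tagged, key=lambda p: p[0])]
def create_balanced_mix_alt (categories : List (String × List String)) : List String :=
  let tagged := (PySem.List.enumerate [("expert" : String), "experience", "other"] 0).flatMap
    (fun rk => (PySem.List.enumerate (lookupCat categories rk.2) 0).map
      (fun p => (3 * p.1 + rk.1, p.2)))
  (PySem.List.sorted tagged (fun p => p.1) false).map (fun p => p.2)

-- ===== PRECONDITION & SPEC =====
-- Pre_ excludes inputs missing one of the keys 'expert'/'experience'/'other', on which A raises KeyError.
def Pre_create_balanced_mix (categories : List (String × List String)) : Prop :=
  (categories.find? (fun p => p.1 == "expert")).isSome = true ∧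
  (categories.find? (fun p => p.1 == "experience")).isSome = true ∧
  (categories.find? (fun p => p.1 == "other")).isSome = true
instance (categories : List (String × List String)) : Decidable (Pre_create_balanced_mix categories) := by unfold Pre_create_balanced_mix; infer_instance

def pvWitness_create_balanced_mix : (List (String × List String)) :=
  [("expert", ["e1", "e2"]), ("experience", ["x1"]), ("other", ["o1", "o2", "o3"])]

def Spec_create_balanced_mix (categories : List (String × List String)) (out : List String) : Prop := out = create_balanced_mix_alt categories
instance (categories : List (String × List String)) (out : List String) : Decidable (Spec_create_balanced_mix categories out) := by unfold Spec_create_balanced_mix; infer_instance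

-- ===== CLAIM (what is proved, stated in full; the proofs are below) =====
def Claim_equal_create_balanced_mix : Prop := ∀ (categories : List (String × List String)), Dom_create_balanced_mix categories → Pre_create_balanced_mix categories → Spec_create_balanced_mix categories (create_balanced_mix categories)

-- ===== LEMMAS AND PROOFS =====

-- proof-only normal form: the rotation order, taken as a recursive definition
def interleave3 : List String → List String → List String → List String
  | [], [], [] => []
  | [], [], o :: os => o :: interleave3 [] [] os
  | [], x :: xs, [] => x :: interleave3 [] xs []
  | [], x :: xs, o :: os => x :: o :: interleave3 [] xs os
  | e :: es, [], [] => e :: interleave3 es [] []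
  | e :: es, [], o :: os => e :: o :: interleave3 es [] os
  | e :: es, x :: xs, [] => e :: x :: interleave3 es xs []
  | e :: es, x :: xs, o :: os => e :: x :: o :: interleave3 es xs os
termination_by e x o => e.length + x.length + o.length

-- ---------- A-side: A's foldl equals interleave3 ----------
def g3 (e x o : List String) (i : Int) : List String :=
  (if i < (e.length : Int) then [PySem.List.pyGetD e i ""] else []) ++
  (if i < (x.length : Int) then [PySem.List.pyGetD x i ""] else []) ++
  (if i < (o.length : Int) then [PySem.List.pyGetD o i ""] else [])

theorem g3_shift (e x o : List String) (k : Nat) :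
    g3 e x o (1 + (k : Int)) = g3 e.tail x.tail o.tail (k : Int) := by
  have h : ∀ l : List String,
      (if (1 + (k : Int)) < (l.length : Int) then [PySem.List.pyGetD l (1 + (k : Int)) ""] else [])
      = (if (k : Int) < (l.tail.length : Int) then [PySem.List.pyGetD l.tail (k : Int) ""] else []) := by
    intro l
    cases l with
    | nil =>
        simp only [List.tail_nil, List.length_nil, Nat.cast_zero]
        rw [if_neg (by omega), if_neg (by omega)]
    | cons a t =>
        have hc : (1 : Int) + (k : Int) = ((k + 1 : Nat) : Int) := by push_cast; ring
        rw [hc, PySem.List.pyGetD_natCast, PySem.List.pyGetD_natCast, List.tail_cons]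
        by_cases hk : k < t.length
        · rw [if_pos (by simp only [List.length_cons]; push_cast; omega), if_pos (by exact_mod_cast hk), List.getD_cons_succ]
        · rw [if_neg (by simp only [List.length_cons]; push_cast; omega), if_neg (by exact_mod_cast hk)]
  unfold g3
  rw [h e, h x, h o]

theorem flatMap_range_succ_shift (f : Int → List String) (n : Nat) :
    ((PySem.List.pyRange 0 ((n : Int) + 1) 1).flatMap f)
      = f 0 ++ (PySem.List.pyRange 0 (n : Int) 1).flatMap (fun i => f (1 + i)) := by
  rw [PySem.List.pyRange_one_cons (by omega)]
  rw [List.flatMap_cons]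
  congr 1
  rw [PySem.List.pyRange_one, PySem.List.pyRange_one]
  simp [List.flatMap_map]

theorem flat3_step (e x o : List String) (h : e ≠ [] ∨ x ≠ [] ∨ o ≠ []) :
    (PySem.List.pyRange 0 (max (e.length : Int) (max (x.length : Int) (o.length : Int))) 1).flatMap (g3 e x o)
      = g3 e x o 0 ++
        (PySem.List.pyRange 0 (max (e.tail.length : Int) (max (x.tail.length : Int) (o.tail.length : Int))) 1).flatMap
          (g3 e.tail x.tail o.tail) := by
  have hM : max (e.length : Int) (max (x.length : Int) (o.length : Int))
      = ((max e.tail.length (max x.tail.length o.tail.length) : Nat) : Int) + 1 := by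
    have hpos : 0 < max e.length (max x.length o.length) := by
      rcases h with h | h | h <;> have := List.length_pos_iff.mpr h <;> omega
    have hme : e.tail.length = e.length - 1 := List.length_tail
    have hmx : x.tail.length = x.length - 1 := List.length_tail
    have hmo : o.tail.length = o.length - 1 := List.length_tail
    rw [hme, hmx, hmo]
    push_cast
    omega
  have hMt : max (e.tail.length : Int) (max (x.tail.length : Int) (o.tail.length : Int))
      = ((max e.tail.length (max x.tail.length o.tail.length) : Nat) : Int) := by push_cast; ring
  rw [hM, hMt, flatMap_range_succ_shift]
  congr 1
  rw [PySem.List.pyRange_one, List.flatMap_map, List.flatMap_map]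
  simp only [sub_zero, Int.toNat_natCast]
  have hf : (fun k : Nat => g3 e x o (1 + ((0 : Int) + (k : Int))))
      = (fun k : Nat => g3 e.tail x.tail o.tail ((0 : Int) + (k : Int))) :=
    funext fun k => by rw [zero_add]; exact g3_shift e x o k
  rw [hf]

theorem flat3 (e x o : List String) :
    (PySem.List.pyRange 0 (max (e.length : Int) (max (x.length : Int) (o.length : Int))) 1).flatMap (g3 e x o)
      = interleave3 e x o := by
  fun_induction interleave3 e x o with
  | case1 => simp [PySem.List.pyRange]
  | _ =>
    rename_i ih
    rw [flat3_step _ _ _ (by simp)]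
    simp only [List.tail_nil, List.tail_cons]
    rw [ih]
    simp [g3, PySem.List.pyGetD, PySem.List.pyGet?, PySem.List.pyIdx?]

theorem a_eq_interleave3 (e x o : List String) :
    (PySem.List.pyRange 0 (max (e.length : Int) (max (x.length : Int) (o.length : Int))) 1).foldl
      (fun acc i =>
        let acc := if i < (e.length : Int) then acc ++ [PySem.List.pyGetD e i ""] else acc
        let acc := if i < (x.length : Int) then acc ++ [PySem.List.pyGetD x i ""] else acc
        if i < (o.length : Int) then acc ++ [PySem.List.pyGetD o i ""] else acc) [] =
    interleave3 e x o := by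
  have hbody : (fun (acc : List String) (i : Int) =>
      let acc := if i < (e.length : Int) then acc ++ [PySem.List.pyGetD e i ""] else acc
      let acc := if i < (x.length : Int) then acc ++ [PySem.List.pyGetD x i ""] else acc
      if i < (o.length : Int) then acc ++ [PySem.List.pyGetD o i ""] else acc)
      = (fun (acc : List String) (i : Int) => acc ++ g3 e x o i) := by
    funext acc i
    simp only [g3]
    split_ifs <;> simp
  rw [hbody, PySem.List.foldl_append_eq_flatMap, List.nil_append, flat3]

-- ---------- B-side: the sorted tagged pool equals interleave3 ----------
-- tg r j l : the tagged row for one category (rank r), items enumerated from j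
def tg (r : Int) (j : Int) (l : List String) : List (Int × String) :=
  (PySem.List.enumerate l j).map (fun p => (3 * p.1 + r, p.2))

theorem tg_nil (r j : Int) : tg r j [] = [] := by simp [tg, PySem.List.enumerate]

theorem tg_cons (r j : Int) (a : String) (l : List String) :
    tg r j (a :: l) = (3 * j + r, a) :: tg r (j + 1) l := by
  simp [tg, PySem.List.enumerate]

-- the sorted order, named: per round j the (at most three) items with keys 3j, 3j+1, 3j+2
def zs : Nat → List String → List String → List String → List (Int × String)
  | _, [], [], [] => []
  | j, [], [], o :: os => (3 * (j : Int) + 2, o) :: zs (j+1) [] [] os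
  | j, [], x :: xs, [] => (3 * (j : Int) + 1, x) :: zs (j+1) [] xs []
  | j, [], x :: xs, o :: os => (3 * (j : Int) + 1, x) :: (3 * (j : Int) + 2, o) :: zs (j+1) [] xs os
  | j, e :: es, [], [] => (3 * (j : Int), e) :: zs (j+1) es [] []
  | j, e :: es, [], o :: os => (3 * (j : Int), e) :: (3 * (j : Int) + 2, o) :: zs (j+1) es [] os
  | j, e :: es, x :: xs, [] => (3 * (j : Int), e) :: (3 * (j : Int) + 1, x) :: zs (j+1) es xs []
  | j, e :: es, x :: xs, o :: os =>
      (3 * (j : Int), e) :: (3 * (j : Int) + 1, x) :: (3 * (j : Int) + 2, o) :: zs (j+1) es xs os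
termination_by _ e x o => e.length + x.length + o.length

theorem zs_snd (j : Nat) (e x o : List String) :
    (zs j e x o).map (fun p => p.2) = interleave3 e x o := by
  fun_induction zs j e x o <;> simp [interleave3, *]

theorem perm_cons_middle {α : Type} (C : α) (L l2 l3 : List α) (h : L.Perm (l2 ++ l3)) :
    (C :: L).Perm (l2 ++ C :: l3) :=
  (h.cons C).trans List.perm_middle.symm

theorem zs_perm (j : Nat) (e x o : List String) :
    (zs j e x o).Perm (tg 0 j e ++ tg 1 j x ++ tg 2 j o) := by
  fun_induction zs j e x o with
  | case1 => simp [tg_nil]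
  | case2 j o os ih =>
      simp only [tg_nil, List.nil_append] at ih ⊢
      push_cast at ih
      simpa [tg_cons] using ih.cons ((3 * (j : Int) + 2, o))
  | case3 j x xs ih =>
      simp only [tg_nil, List.nil_append, List.append_nil] at ih ⊢
      push_cast at ih
      simpa [tg_cons] using ih.cons ((3 * (j : Int) + 1, x))
  | case4 j x xs o os ih =>
      simp only [tg_nil, List.nil_append] at ih ⊢
      push_cast at ih
      have hC := perm_cons_middle ((3 * (j : Int) + 2, o)) _ _ _ ih
      simpa [tg_cons, List.cons_append] using hC.cons ((3 * (j : Int) + 1, x))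
  | case5 j e es ih =>
      simp only [tg_nil, List.append_nil] at ih ⊢
      push_cast at ih
      simpa [tg_cons] using ih.cons ((3 * (j : Int), e))
  | case6 j e es o os ih =>
      simp only [tg_nil, List.append_nil] at ih ⊢
      push_cast at ih
      have hC := perm_cons_middle ((3 * (j : Int) + 2, o)) _ _ _ ih
      simpa [tg_cons, List.cons_append] using hC.cons ((3 * (j : Int), e))
  | case7 j e es x xs ih =>
      simp only [tg_nil, List.append_nil] at ih ⊢
      push_cast at ih
      have hC := perm_cons_middle ((3 * (j : Int) + 1, x)) _ _ _ ih
      simpa [tg_cons, List.cons_append] using hC.cons ((3 * (j : Int), e))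
  | case8 j e es x xs o os ih =>
      push_cast at ih
      have hC := perm_cons_middle ((3 * (j : Int) + 2, o)) _
        (tg 0 ((j : Int) + 1) es ++ tg 1 ((j : Int) + 1) xs) (tg 2 ((j : Int) + 1) os)
        (by simpa [List.append_assoc] using ih)
      have hB := perm_cons_middle ((3 * (j : Int) + 1, x)) _
        (tg 0 ((j : Int) + 1) es)
        (tg 1 ((j : Int) + 1) xs ++ (3 * (j : Int) + 2, o) :: tg 2 ((j : Int) + 1) os)
        (by simpa [List.append_assoc] using hC)
      simpa [tg_cons, List.cons_append, List.append_assoc] using hB.cons ((3 * (j : Int), e))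

theorem zs_lb (j : Nat) (e x o : List String) :
    ∀ p ∈ zs j e x o, 3 * (j : Int) ≤ p.1 := by
  fun_induction zs j e x o with
  | case1 => simp
  | case2 j o os ih =>
      intro p hp
      rcases List.mem_cons.mp hp with rfl | hp
      · simp
      · have := ih p hp; push_cast at this ⊢; omega
  | case3 j x xs ih =>
      intro p hp
      rcases List.mem_cons.mp hp with rfl | hp
      · simp
      · have := ih p hp; push_cast at this ⊢; omega
  | case4 j x xs o os ih =>
      intro p hp
      rcases List.mem_cons.mp hp with rfl | hp
      · simp
      rcases List.mem_cons.mp hp with rfl | hp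
      · simp
      · have := ih p hp; push_cast at this ⊢; omega
  | case5 j e es ih =>
      intro p hp
      rcases List.mem_cons.mp hp with rfl | hp
      · simp
      · have := ih p hp; push_cast at this ⊢; omega
  | case6 j e es o os ih =>
      intro p hp
      rcases List.mem_cons.mp hp with rfl | hp
      · simp
      rcases List.mem_cons.mp hp with rfl | hp
      · simp
      · have := ih p hp; push_cast at this ⊢; omega
  | case7 j e es x xs ih =>
      intro p hp
      rcases List.mem_cons.mp hp with rfl | hp
      · simp
      rcases List.mem_cons.mp hp with rfl | hp
      · simp
      · have := ih p hp; push_cast at this ⊢; omega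
  | case8 j e es x xs o os ih =>
      intro p hp
      rcases List.mem_cons.mp hp with rfl | hp
      · simp
      rcases List.mem_cons.mp hp with rfl | hp
      · simp
      rcases List.mem_cons.mp hp with rfl | hp
      · simp
      · have := ih p hp; push_cast at this ⊢; omega

theorem zs_pairwise (j : Nat) (e x o : List String) :
    (zs j e x o).Pairwise (fun p q => p.1 < q.1) := by
  fun_induction zs j e x o with
  | case1 => simp
  | case2 j o os ih =>
      have hb := zs_lb (j+1) [] [] os
      refine List.pairwise_cons.mpr ⟨?_, ih⟩
      intro q hq; have := hb q hq; push_cast at this ⊢; omega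
  | case3 j x xs ih =>
      have hb := zs_lb (j+1) [] xs []
      refine List.pairwise_cons.mpr ⟨?_, ih⟩
      intro q hq; have := hb q hq; push_cast at this ⊢; omega
  | case4 j x xs o os ih =>
      have hb := zs_lb (j+1) [] xs os
      refine List.pairwise_cons.mpr ⟨?_, List.pairwise_cons.mpr ⟨?_, ih⟩⟩
      · intro q hq
        rcases List.mem_cons.mp hq with rfl | hq
        · simp
        · have := hb q hq; push_cast at this ⊢; omega
      · intro q hq; have := hb q hq; push_cast at this ⊢; omega
  | case5 j e es ih =>
      have hb := zs_lb (j+1) es [] []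
      refine List.pairwise_cons.mpr ⟨?_, ih⟩
      intro q hq; have := hb q hq; push_cast at this ⊢; omega
  | case6 j e es o os ih =>
      have hb := zs_lb (j+1) es [] os
      refine List.pairwise_cons.mpr ⟨?_, List.pairwise_cons.mpr ⟨?_, ih⟩⟩
      · intro q hq
        rcases List.mem_cons.mp hq with rfl | hq
        · simp
        · have := hb q hq; push_cast at this ⊢; omega
      · intro q hq; have := hb q hq; push_cast at this ⊢; omega
  | case7 j e es x xs ih =>
      have hb := zs_lb (j+1) es xs []
      refine List.pairwise_cons.mpr ⟨?_, List.pairwise_cons.mpr ⟨?_, ih⟩⟩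
      · intro q hq
        rcases List.mem_cons.mp hq with rfl | hq
        · simp
        · have := hb q hq; push_cast at this ⊢; omega
      · intro q hq; have := hb q hq; push_cast at this ⊢; omega
  | case8 j e es x xs o os ih =>
      have hb := zs_lb (j+1) es xs os
      refine List.pairwise_cons.mpr ⟨?_, List.pairwise_cons.mpr ⟨?_, List.pairwise_cons.mpr ⟨?_, ih⟩⟩⟩
      · intro q hq
        rcases List.mem_cons.mp hq with rfl | hq
        · simp
        rcases List.mem_cons.mp hq with rfl | hq
        · simp
        · have := hb q hq; push_cast at this ⊢; omega
      · intro q hq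
        rcases List.mem_cons.mp hq with rfl | hq
        · simp
        · have := hb q hq; push_cast at this ⊢; omega
      · intro q hq; have := hb q hq; push_cast at this ⊢; omega

theorem b_eq_interleave3 (e x o : List String) :
    (PySem.List.sorted (tg 0 0 e ++ tg 1 0 x ++ tg 2 0 o) (fun p => p.1) false).map (fun p => p.2)
      = interleave3 e x o := by
  have hs : PySem.List.sorted (tg 0 0 e ++ tg 1 0 x ++ tg 2 0 o)
      (fun p : Int × String => p.1) false = zs 0 e x o :=
    PySem.List.sorted_eq_of_perm_of_pairwise_lt _ _ _ (zs_perm 0 e x o) (zs_pairwise 0 e x o)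
  rw [hs]
  exact zs_snd 0 e x o

-- ===== VERDICT (by name: the statement is the Claim_ definition above) =====
theorem create_balanced_mix_spec : Claim_equal_create_balanced_mix := by
  intro cats _ _
  unfold Spec_create_balanced_mix create_balanced_mix create_balanced_mix_alt
  have htag : (PySem.List.enumerate [("expert" : String), "experience", "other"] 0).flatMap
      (fun rk => (PySem.List.enumerate (lookupCat cats rk.2) 0).map
        (fun p => (3 * p.1 + rk.1, p.2)))
      = tg 0 0 (lookupCat cats "expert") ++ tg 1 0 (lookupCat cats "experience")
        ++ tg 2 0 (lookupCat cats "other") := by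
    simp [PySem.List.enumerate, tg, List.append_assoc]
  simp only [htag]
  rw [a_eq_interleave3, b_eq_interleave3]
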